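-- pv_equiv track=rewrite | github.com/DeveBeen/Project_Python | Lotto_Simulation/function.py | lotto_rank2
-- ===== SOURCE A (Python) =====
-- def lotto_rank2(win_list, random_list): # 받은 리스트가 2등 번호인지 확인하는 함수
--     count = 0 # 맞는 횟수 판별 변수 선언
--     for i in range(0,6):
--         for j in range(0,6):
--             if win_list[i] == random_list[j]:
--                 count += 1
--             j += 1
--         i += 1
--     if count == 5: # 입력한 번호가 5개가 일치하면 2등
--         return 1
--     else:
--         return 0
-- ===== SOURCE B (Python) =====
-- def _counts(xs):
--     c = {}
--     for v in xs:
--         c[v] = c.get(v, 0) + 1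
--     return c
--
-- def lotto_rank2(win_list, random_list):
--     wc = _counts(win_list[i] for i in range(6))
--     rc = _counts(random_list[j] for j in range(6))
--     count = sum(n * rc.get(v, 0) for v, n in wc.items())
--     return 1 if count == 5 else 0
-- ===== Notes on version B (the rewrite author's own statement) =====
-- stated objective: idiomatic
-- what changed: Replaces the 6x6 nested comparison scan with two frequency tables over the six numbers of each list and a dot product of counts over the distinct winning values (product of counts, so duplicate values are pair-counted exactly like the nested loop).
import Mathlib
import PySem

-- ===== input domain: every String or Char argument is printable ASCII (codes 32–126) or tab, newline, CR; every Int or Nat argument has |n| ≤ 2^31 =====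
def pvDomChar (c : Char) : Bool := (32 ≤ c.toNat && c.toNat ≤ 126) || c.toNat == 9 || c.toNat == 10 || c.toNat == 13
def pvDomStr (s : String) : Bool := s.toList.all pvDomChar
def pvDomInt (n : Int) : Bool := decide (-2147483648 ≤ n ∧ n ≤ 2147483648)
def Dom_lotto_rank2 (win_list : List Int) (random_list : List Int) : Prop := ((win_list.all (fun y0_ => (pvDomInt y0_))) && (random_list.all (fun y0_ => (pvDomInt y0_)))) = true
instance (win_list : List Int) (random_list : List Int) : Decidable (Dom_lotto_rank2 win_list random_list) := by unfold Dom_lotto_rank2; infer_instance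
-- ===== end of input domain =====

-- ===== PORT A =====
-- B replaces A's 6x6 nested index scan by two frequency dictionaries and a dot product (idiomatic; exact pair-counting on duplicates).
def lotto_rank2 (win_list : List Int) (random_list : List Int) : Int :=
  let count : Int :=
    (PySem.List.pyRange 0 6 1).foldl (fun c i =>
      (PySem.List.pyRange 0 6 1).foldl (fun c j =>
        if PySem.List.pyGetD win_list i 0 = PySem.List.pyGetD random_list j 0 then c + 1 else c) c) 0
  if count = 5 then 1 else 0

-- ===== PORT B =====
def pvCounts (xs : List Int) : PySem.Dict Int Int :=
  xs.foldl (fun c v => c.insert v (c.getD v 0 + 1)) PySem.Dict.empty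

def lotto_rank2_alt (win_list : List Int) (random_list : List Int) : Int :=
  let wc := pvCounts ((PySem.List.pyRange 0 6 1).map (fun i => PySem.List.pyGetD win_list i 0))
  let rc := pvCounts ((PySem.List.pyRange 0 6 1).map (fun j => PySem.List.pyGetD random_list j 0))
  let count : Int := wc.items.foldl (fun s p => s + p.2 * rc.getD p.1 0) 0
  if count = 5 then 1 else 0

-- ===== PRECONDITION & SPEC =====
-- Pre_ excludes exactly the inputs on which A raises IndexError: a list with fewer than 6 elements.
def Pre_lotto_rank2 (win_list : List Int) (random_list : List Int) : Prop :=
  6 ≤ win_list.length ∧ 6 ≤ random_list.length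
instance (win_list : List Int) (random_list : List Int) : Decidable (Pre_lotto_rank2 win_list random_list) := by
  unfold Pre_lotto_rank2; infer_instance
def pvWitness_lotto_rank2 : List Int × List Int := ([1, 2, 3, 4, 5, 6], [1, 2, 3, 4, 5, 7])

def Spec_lotto_rank2 (win_list : List Int) (random_list : List Int) (out : Int) : Prop := out = lotto_rank2_alt win_list random_list
instance (win_list : List Int) (random_list : List Int) (out : Int) : Decidable (Spec_lotto_rank2 win_list random_list out) := by unfold Spec_lotto_rank2; infer_instance

-- ===== CLAIM (what is proved, stated in full; the proofs are below) =====
def Claim_equal_lotto_rank2 : Prop := ∀ (win_list : List Int) (random_list : List Int), Dom_lotto_rank2 win_list random_list → Pre_lotto_rank2 win_list random_list → Spec_lotto_rank2 win_list random_list (lotto_rank2 win_list random_list)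

-- ===== LEMMAS AND PROOFS =====

-- a fold over range(0, 6) reading xs[j] is a fold over the first 6 elements
theorem pvRangeFold (L : List Int) (hL : 6 ≤ L.length) (f : Int → Int → Int) (c : Int) :
    (PySem.List.pyRange 0 6 1).foldl (fun c j => f c (PySem.List.pyGetD L j 0)) c
      = (L.take 6).foldl f c := by
  have hlen : ((L.take 6).length : Int) = 6 := by rw [List.length_take]; omega 
  have hcong : (PySem.List.pyRange 0 6 1).foldl (fun c j => f c (PySem.List.pyGetD L j 0)) c
      = (PySem.List.pyRange 0 6 1).foldl (fun c j => f c (PySem.List.pyGetD (L.take 6) j 0)) c := by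
    apply PySem.List.foldl_congr_mem
    intro acc j hj
    rw [PySem.List.mem_pyRange_one] at hj
    have h0 : (0:Int) ≤ j := hj.1
    have h1 : j < ((L.take 6).length : Int) := by omega
    have h1' : j < (L.length : Int) := by omega
    rw [PySem.List.pyGetD_eq_getElem L 0 h0 h1', PySem.List.pyGetD_eq_getElem (L.take 6) 0 h0 h1,
      List.getElem_take]
  rw [hcong, show (6:Int) = ((L.take 6).length : Int) from hlen.symm]
  have h := PySem.List.foldl_pyRange_zero_pyGetD (L.take 6) (0:Int) f c
  simpa only [PySem.List.len_eq] using h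

-- the generator '(xs[i] for i in range(6))' is the first 6 elements
theorem pvRangeMap (L : List Int) (hL : 6 ≤ L.length) :
    (PySem.List.pyRange 0 6 1).map (fun i => PySem.List.pyGetD L i 0) = L.take 6 := by
  have hlen : ((L.take 6).length : Int) = 6 := by rw [List.length_take]; omega
  have hcong : (PySem.List.pyRange 0 6 1).map (fun i => PySem.List.pyGetD L i 0)
      = (PySem.List.pyRange 0 6 1).map (fun i => PySem.List.pyGetD (L.take 6) i 0) := by
    apply List.map_congr_left
    intro j hj
    rw [PySem.List.mem_pyRange_one] at hj
    have h0 : (0:Int) ≤ j := hj.1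
    have h1 : j < ((L.take 6).length : Int) := by omega
    have h1' : j < (L.length : Int) := by omega
    rw [PySem.List.pyGetD_eq_getElem L 0 h0 h1', PySem.List.pyGetD_eq_getElem (L.take 6) 0 h0 h1,
      List.getElem_take]
  rw [hcong, show (6:Int) = ((L.take 6).length : Int) from hlen.symm]
  exact PySem.List.map_pyGetD_pyRange_zero' (L.take 6) 0

-- the count loop 'if x == y: c += 1' over a list is c + count of x
theorem pvCountLoop (l : List Int) (x : Int) (c : Int) :
    l.foldl (fun c y => if x = y then c + 1 else c) c = c + (l.count x : Int) := by
  have h : (fun (c : Int) (y : Int) => if x = y then c + 1 else c)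
      = (fun (c : Int) (y : Int) => if (y == x) = true then c + 1 else c) := by
    funext c y
    by_cases hxy : x = y
    · simp [hxy]
    · have hyx : y ≠ x := fun h => hxy h.symm
      simp [hxy, hyx]
  rw [h, PySem.List.foldl_count_if (fun y => y == x) l c, List.count]

-- sum over a Nodup list of a one-point function
theorem pvSumIf (S : List Int) (f : Int → Int) (a : Int) (hnd : S.Nodup) (ha : a ∈ S) :
    (S.map (fun v => if v = a then f v else 0)).sum = f a := by
  induction S with
  | nil => cases ha
  | cons s t ih =>
    by_cases hsa : s = a
    · subst hsa
      have hnot : s ∉ t := (List.nodup_cons.mp hnd).1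
      have hz : (t.map (fun v => if v = s then f v else 0)).sum = 0 := by
        apply List.sum_eq_zero
        intro x hx
        rcases List.mem_map.mp hx with ⟨v, hv, hvx⟩
        have hvs : v ≠ s := fun h => hnot (h ▸ hv)
        simp [← hvx, hvs]
      simp [hz]
    · have hat : a ∈ t := by
        rcases List.mem_cons.mp ha with h | h
        · exact absurd h.symm hsa
        · exact h
      have := ih (List.nodup_cons.mp hnd).2 hat
      simp [hsa, this]

-- dot product of counts over the distinct values = plain sum over the list
theorem pvDotEq (L : List Int) (S : List Int) (f : Int → Int) (hnd : S.Nodup)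
    (hmem : ∀ x ∈ L, x ∈ S) :
    (S.map (fun v => (L.count v : Int) * f v)).sum = (L.map f).sum := by
  induction L with
  | nil => simp
  | cons a t ih =>
    have hmem' : ∀ x ∈ t, x ∈ S := fun x hx => hmem x (List.mem_cons_of_mem a hx)
    have ha : a ∈ S := hmem a List.mem_cons_self
    have hpt : (fun v => (((a :: t).count v : Int)) * f v)
        = (fun v => ((t.count v : Int) * f v) + (if v = a then f v else 0)) := by
      funext v
      rw [List.count_cons]
      by_cases hva : a = v
      · subst hva; simp; ring
      · have : v ≠ a := fun h => hva h.symm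
        simp [hva, this]
    rw [hpt, PySem.List.sum_map_add_int, ih hmem', pvSumIf S f a hnd ha,
      List.map_cons, List.sum_cons]
    ring

-- ===== VERDICT (by name: the statement is the Claim_ definition above) =====
theorem lotto_rank2_spec : Claim_equal_lotto_rank2 := by
  intro w r _ hpre
  rcases hpre with ⟨hw, hr⟩
  show lotto_rank2 w r = lotto_rank2_alt w r
  have hA : (PySem.List.pyRange 0 6 1).foldl (fun c i =>
        (PySem.List.pyRange 0 6 1).foldl (fun c j =>
          if PySem.List.pyGetD w i 0 = PySem.List.pyGetD r j 0 then c + 1 else c) c) 0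
      = ((w.take 6).map (fun x => ((r.take 6).count x : Int))).sum := by
    have step1 : (PySem.List.pyRange 0 6 1).foldl (fun c i =>
          (PySem.List.pyRange 0 6 1).foldl (fun c j =>
            if PySem.List.pyGetD w i 0 = PySem.List.pyGetD r j 0 then c + 1 else c) c) 0
        = (PySem.List.pyRange 0 6 1).foldl (fun c i =>
            c + ((r.take 6).count (PySem.List.pyGetD w i 0) : Int)) 0 := by
      apply PySem.List.foldl_congr_mem
      intro acc i _
      rw [pvRangeFold r hr (fun c y => if PySem.List.pyGetD w i 0 = y then c + 1 else c) acc,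
        pvCountLoop]
    rw [step1, pvRangeFold w hw (fun c y => c + ((r.take 6).count y : Int)) 0,
      PySem.List.foldl_add (w.take 6) (fun y => ((r.take 6).count y : Int)) 0]
    simp
  have hB : (pvCounts ((PySem.List.pyRange 0 6 1).map (fun i => PySem.List.pyGetD w i 0))).items.foldl
        (fun s p => s + p.2 * (pvCounts ((PySem.List.pyRange 0 6 1).map (fun j => PySem.List.pyGetD r j 0))).getD p.1 0) 0
      = ((PySem.Set.ofList (w.take 6)).map
          (fun v => ((w.take 6).count v : Int) * ((r.take 6).count v : Int))).sum := by
    rw [pvRangeMap w hw, pvRangeMap r hr]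
    unfold pvCounts
    rw [PySem.Dict.foldl_insert_getD_add_one_eq_counter, PySem.Dict.foldl_insert_getD_add_one_eq_counter,
      PySem.List.foldl_add ((PySem.Dict.counter (w.take 6)).items)
        (fun p => p.2 * (PySem.Dict.counter (r.take 6)).getD p.1 0) 0,
      PySem.Dict.items_counter, List.map_map]
    simp [Function.comp_def, PySem.Dict.getD_counter]
  have hDot := pvDotEq (w.take 6) (PySem.Set.ofList (w.take 6)) (fun v => ((r.take 6).count v : Int))
      (PySem.Set.nodup_ofList _) (fun x hx => (PySem.Set.mem_ofList _ x).mpr hx)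
  simp only [lotto_rank2, lotto_rank2_alt]
  rw [hA, hB, hDot]
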